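-- pv_equiv track=rewrite | github.com/hydropix/TranslateBookWithLLM | src/core/epub/html_chunker.py | _is_block_closing_tag
-- ===== SOURCE A (Python) =====
-- def _is_block_closing_tag(tag: str) -> bool:
--     """Check if the tag is a block closing tag (</p>, </div>, etc.)"""
--     block_tags = {'p', 'div', 'h1', 'h2', 'h3', 'h4', 'h5', 'h6',
--                   'blockquote', 'section', 'article', 'li', 'tr', 'td', 'th'}
--     tag_lower = tag.lower()
--     for bt in block_tags:
--         if f'</{bt}>' in tag_lower or f'</{bt} ' in tag_lower:
--             return True
--     return False
-- ===== SOURCE B (Python) =====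
-- def _is_block_closing_tag(tag: str) -> bool:
--     """Check if the tag is a block closing tag (</p>, </div>, etc.)"""
--     block_tags = {'p', 'div', 'h1', 'h2', 'h3', 'h4', 'h5', 'h6',
--                   'blockquote', 'section', 'article', 'li', 'tr', 'td', 'th'}
--     s = tag.lower()
--     # single tokenizing pass: at each "</", read the word that follows and
--     # accept if it is a block tag terminated by '>' or a space
--     for i in range(len(s) - 1):
--         if s[i] == '<' and s[i + 1] == '/':
--             k = i + 2
--             while k < len(s) and (s[k].isalnum() or s[k] == '_'):
--                 k += 1
--             if k < len(s) and s[k] in ' >' and s[i + 2:k] in block_tags: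
--                 return True
--     return False
-- ===== Notes on version B (the rewrite author's own statement) =====
-- stated objective: alternative
-- what changed: A runs 15 separate substring searches ('</bt>' / '</bt ') over the lowered string; B makes one left-to-right tokenizing pass that, at each closing-tag marker (less-than, slash), reads the following word run and its terminator and tests the word against the same tag set.
import Mathlib
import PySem

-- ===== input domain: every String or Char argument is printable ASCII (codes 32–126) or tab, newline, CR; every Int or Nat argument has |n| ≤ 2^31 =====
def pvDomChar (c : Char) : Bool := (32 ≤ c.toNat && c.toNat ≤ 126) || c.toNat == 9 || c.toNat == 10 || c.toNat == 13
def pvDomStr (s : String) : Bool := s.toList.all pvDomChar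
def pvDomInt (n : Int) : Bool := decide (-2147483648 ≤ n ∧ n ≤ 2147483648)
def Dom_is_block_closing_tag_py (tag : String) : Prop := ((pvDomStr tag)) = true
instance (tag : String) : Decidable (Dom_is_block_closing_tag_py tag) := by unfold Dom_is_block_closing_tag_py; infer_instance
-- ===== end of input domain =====

-- B replaces A's fifteen substring scans by one left-to-right tokenizing pass that reads the
-- word after each closing-tag marker and tests it against the same tag set (objective: alternative).

-- the block-tag set both Pythons share (Python set literal, kept in literal order)
def pvBlockTags : List (List Char) :=
  ["p".toList, "div".toList, "h1".toList, "h2".toList, "h3".toList, "h4".toList,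
   "h5".toList, "h6".toList, "blockquote".toList, "section".toList, "article".toList,
   "li".toList, "tr".toList, "td".toList, "th".toList]

-- ===== PORT A =====
-- for bt in block_tags: if f'</{bt}>' in tag_lower or f'</{bt} ' in tag_lower: return True
def is_block_closing_tag_py (tag : String) : Bool :=
  let tagLower := PySem.Chars.lower tag.toList
  pvBlockTags.any (fun bt =>
    PySem.Chars.isIn ('<' :: '/' :: (bt ++ ['>'])) tagLower ||
    PySem.Chars.isIn ('<' :: '/' :: (bt ++ [' '])) tagLower)

-- ===== PORT B =====
-- s[k].isalnum() or s[k] == '_'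
def pvIsWord (c : Char) : Bool := PySem.Chars.isalnum c || c == '_'

-- the body of Source B's loop at one position i: s[i]=='<' and s[i+1]=='/', then the word run
-- s[i+2:k] (takeWhile) and its terminator s[k] (head of dropWhile)
def pvCheckAt (l : List Char) : Bool :=
  match l with
  | a :: b :: r =>
      if a = '<' ∧ b = '/' then
        match r.dropWhile pvIsWord with
        | d :: _ => (d == ' ' || d == '>') && pvBlockTags.contains (r.takeWhile pvIsWord)
        | [] => false
      else false
  | _ => false

-- Source B's 'for i in range(len(s) - 1)', as recursion over the suffixes of s
def pvScan : List Char → Bool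
  | [] => false
  | a :: rest => pvCheckAt (a :: rest) || pvScan rest

def is_block_closing_tag_py_alt (tag : String) : Bool :=
  pvScan (PySem.Chars.lower tag.toList)

-- ===== PRECONDITION & SPEC =====
def Spec_is_block_closing_tag_py (tag : String) (out : Bool) : Prop := out = is_block_closing_tag_py_alt tag
instance (tag : String) (out : Bool) : Decidable (Spec_is_block_closing_tag_py tag out) := by unfold Spec_is_block_closing_tag_py; infer_instance

-- ===== CLAIM (what is proved, stated in full; the proofs are below) =====
def Claim_equal_is_block_closing_tag_py : Prop := ∀ (tag : String), Dom_is_block_closing_tag_py tag → Spec_is_block_closing_tag_py tag (is_block_closing_tag_py tag)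

-- ===== LEMMAS AND PROOFS =====

-- every block tag is a nonempty run of word characters, and the two terminators are not word characters
lemma pvBlockTags_word : ∀ bt ∈ pvBlockTags, bt.all pvIsWord = true := by decide
lemma pvIsWord_term : pvIsWord '>' = false ∧ pvIsWord ' ' = false := by decide

lemma pvTakeWhile_all_append (p : Char → Bool) (w t : List Char) (hw : w.all p = true) :
    (w ++ t).takeWhile p = w ++ t.takeWhile p := by
  induction w with
  | nil => rfl
  | cons a w ih => simp_all

lemma pvDropWhile_all_append (p : Char → Bool) (w t : List Char) (hw : w.all p = true) :
    (w ++ t).dropWhile p = t.dropWhile p := by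
  induction w with
  | nil => rfl
  | cons a w ih => simp_all

lemma pvCheckAt_iff (l : List Char) :
    pvCheckAt l = true ↔
      ∃ bt ∈ pvBlockTags, ∃ c, (c = '>' ∨ c = ' ') ∧ ('<' :: '/' :: (bt ++ [c])) <+: l := by
  match l with
  | [] => simp [pvCheckAt]
  | [a] => simp [pvCheckAt]
  | a :: b :: r =>
    by_cases hab : a = '<' ∧ b = '/'
    · obtain ⟨rfl, rfl⟩ := hab
      show (if ('<' : Char) = '<' ∧ ('/' : Char) = '/' then
          match r.dropWhile pvIsWord with
          | d :: _ => (d == ' ' || d == '>') && pvBlockTags.contains (r.takeWhile pvIsWord)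
          | [] => false
        else false) = true ↔ _
      rw [if_pos ⟨rfl, rfl⟩]
      constructor
      · intro h
        match hd : r.dropWhile pvIsWord with
        | [] => rw [hd] at h; exact absurd h (by simp)
        | d :: tail =>
          rw [hd] at h
          have h1 : (d == ' ' || d == '>') = true := by
            cases hdc : (d == ' ' || d == '>') <;> simp [hdc] at h ⊢
          have h2 : (r.takeWhile pvIsWord) ∈ pvBlockTags := by
            have := (Bool.and_eq_true _ _).mp h |>.2
            simpa using this
          refine ⟨r.takeWhile pvIsWord, h2, d, ?_, ?_⟩
          · rcases (Bool.or_eq_true _ _).mp h1 with h' | h'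
            · exact Or.inr (by simpa using h')
            · exact Or.inl (by simpa using h')
          · have hr : r = r.takeWhile pvIsWord ++ d :: tail := by
              conv_lhs => rw [← List.takeWhile_append_dropWhile (p := pvIsWord) (l := r)]
              rw [hd]
            refine List.cons_prefix_cons.mpr ⟨rfl, List.cons_prefix_cons.mpr ⟨rfl, ?_⟩⟩
            exact ⟨tail, by rw [List.append_assoc]; exact hr.symm⟩
      · rintro ⟨bt, hbt, c, hc, hpre⟩
        obtain ⟨-, hpre⟩ := List.cons_prefix_cons.mp hpre
        obtain ⟨-, hpre⟩ := List.cons_prefix_cons.mp hpre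
        obtain ⟨t, ht⟩ := hpre
        have hcp : pvIsWord c = false := by
          rcases hc with rfl | rfl
          · exact pvIsWord_term.1
          · exact pvIsWord_term.2
        have htw : r.takeWhile pvIsWord = bt := by
          rw [← ht, List.append_assoc, pvTakeWhile_all_append _ _ _ (pvBlockTags_word bt hbt)]
          simp [hcp]
        have hdw : r.dropWhile pvIsWord = c :: t := by
          rw [← ht, List.append_assoc, pvDropWhile_all_append _ _ _ (pvBlockTags_word bt hbt)]
          simp [hcp]
        rw [hdw, htw]
        simp only [Bool.and_eq_true, Bool.or_eq_true, beq_iff_eq]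
        constructor
        · rcases hc with rfl | rfl
          · exact Or.inr rfl
          · exact Or.inl rfl
        · simpa using hbt
    · show (if a = '<' ∧ b = '/' then
          match r.dropWhile pvIsWord with
          | d :: _ => (d == ' ' || d == '>') && pvBlockTags.contains (r.takeWhile pvIsWord)
          | [] => false
        else false) = true ↔ _
      rw [if_neg hab]
      simp only [Bool.false_eq_true, false_iff]
      rintro ⟨bt, hbt, c, hc, hpre⟩
      obtain ⟨h1, hpre2⟩ := List.cons_prefix_cons.mp hpre
      obtain ⟨h2, -⟩ := List.cons_prefix_cons.mp hpre2
      exact hab ⟨h1.symm, h2.symm⟩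

lemma pvScan_iff (l : List Char) :
    pvScan l = true ↔
      ∃ bt ∈ pvBlockTags, ∃ c, (c = '>' ∨ c = ' ') ∧ ('<' :: '/' :: (bt ++ [c])) <:+: l := by
  induction l with
  | nil => simp [pvScan]
  | cons a rest ih =>
    rw [pvScan]
    simp only [Bool.or_eq_true, pvCheckAt_iff, ih]
    constructor
    · rintro (⟨bt, hbt, c, hc, h⟩ | ⟨bt, hbt, c, hc, h⟩)
      · exact ⟨bt, hbt, c, hc, h.isInfix⟩
      · exact ⟨bt, hbt, c, hc, h.trans (List.suffix_cons a rest).isInfix⟩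
    · rintro ⟨bt, hbt, c, hc, h⟩
      rcases List.infix_cons_iff.mp h with h' | h'
      · exact Or.inl ⟨bt, hbt, c, hc, h'⟩
      · exact Or.inr ⟨bt, hbt, c, hc, h'⟩

lemma pvAny_iff (l : List Char) :
    (pvBlockTags.any (fun bt =>
       PySem.Chars.isIn ('<' :: '/' :: (bt ++ ['>'])) l ||
       PySem.Chars.isIn ('<' :: '/' :: (bt ++ [' '])) l)) = true ↔
      ∃ bt ∈ pvBlockTags, ∃ c, (c = '>' ∨ c = ' ') ∧ ('<' :: '/' :: (bt ++ [c])) <:+: l := by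
  simp only [List.any_eq_true, Bool.or_eq_true, PySem.Chars.isIn_iff_infix]
  constructor
  · rintro ⟨bt, hbt, h | h⟩
    · exact ⟨bt, hbt, '>', Or.inl rfl, h⟩
    · exact ⟨bt, hbt, ' ', Or.inr rfl, h⟩
  · rintro ⟨bt, hbt, c, (rfl | rfl), h⟩
    · exact ⟨bt, hbt, Or.inl h⟩
    · exact ⟨bt, hbt, Or.inr h⟩

-- ===== VERDICT (by name: the statement is the Claim_ definition above) =====
theorem is_block_closing_tag_py_spec : Claim_equal_is_block_closing_tag_py := by
  intro tag _
  unfold Spec_is_block_closing_tag_py is_block_closing_tag_py is_block_closing_tag_py_alt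
  rw [Bool.eq_iff_iff, pvAny_iff, pvScan_iff]
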